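-- pv_equiv track=rewrite | github.com/oguuk/Programmers | Lv2/월간 코드 챌린지 시즌3 n^2 배열 자르기.py | solution
-- ===== SOURCE A (Python) =====
-- def solution(n, left, right):
--     count = (left//n)*n
--     answer = []
--     for i in range(left//n,(right//n)+1):
--         for j in range(1,n+1):
--             count+=1
--             if count >left:
--                 if j <= i:
--                     answer.append(i+1)
--                 else:
--                     answer.append(j)
--             if count > right:
--                 return answer
-- ===== SOURCE B (Python) =====
-- def solution(n, left, right):
--     return [max(idx // n, idx % n) + 1 for idx in range(left, right + 1)]
-- ===== Notes on version B (the rewrite author's own statement) =====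
-- stated objective: simpler
-- what changed: Replaces A's nested row/column loops with running count, skip-before-left test and early return by a single comprehension computing each cell directly from its flat index as max(idx//n, idx%n)+1.
-- outside the precondition, e.g. on solution(3, 7, 2): A returns None, B returns []
import Mathlib
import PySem

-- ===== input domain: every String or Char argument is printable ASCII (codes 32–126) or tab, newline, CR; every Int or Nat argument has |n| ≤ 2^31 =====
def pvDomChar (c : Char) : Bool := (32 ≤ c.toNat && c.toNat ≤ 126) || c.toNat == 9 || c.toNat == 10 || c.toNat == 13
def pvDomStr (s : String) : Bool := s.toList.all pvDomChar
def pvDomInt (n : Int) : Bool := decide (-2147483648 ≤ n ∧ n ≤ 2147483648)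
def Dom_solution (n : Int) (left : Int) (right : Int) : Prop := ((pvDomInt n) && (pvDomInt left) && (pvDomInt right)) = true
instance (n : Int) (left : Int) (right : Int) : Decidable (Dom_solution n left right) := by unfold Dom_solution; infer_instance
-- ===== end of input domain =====

-- B replaces A's nested row/column loops (running count, skip-before-left, early return)
-- by one linear pass computing each cell directly from its flat index: simpler decomposition.

-- ===== PORT A =====
-- inner 'for j in range(1, n+1)': fuel counts the remaining iterations, j is the running index;
-- Sum.inl (count, answer) = loop ran out, Sum.inr answer = early 'return answer'
def solInner (left right i : Int) : ℕ → Int → Int → List Int → (Int × List Int) ⊕ List Int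
  | 0, _j, count, answer => Sum.inl (count, answer)
  | Nat.succ fuel, j, count, answer =>
    let count := count + 1
    let answer := if count > left then (if j ≤ i then answer ++ [i + 1] else answer ++ [j]) else answer
    if count > right then Sum.inr answer else solInner left right i fuel (j + 1) count answer

-- outer 'for i in range(left//n, right//n + 1)'; falling off the loop is Python's 'return None',
-- excluded by Pre_solution, rendered here as []
def solOuter (n left right : Int) : ℕ → Int → Int → List Int → List Int
  | 0, _i, _count, _answer => []
  | Nat.succ fuel, i, count, answer =>
    match solInner left right i n.toNat 1 count answer with
    | Sum.inr ans => ans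
    | Sum.inl (count', answer') => solOuter n left right fuel (i + 1) count' answer'

def solution (n : Int) (left : Int) (right : Int) : List Int :=
  solOuter n left right
    (PySem.Int.floordiv right n + 1 - PySem.Int.floordiv left n).toNat
    (PySem.Int.floordiv left n) (PySem.Int.floordiv left n * n) []

-- ===== PORT B =====
def solution_alt (n : Int) (left : Int) (right : Int) : List Int :=
  (PySem.List.pyRange left (right + 1) 1).map
    (fun idx => max (PySem.Int.floordiv idx n) (PySem.Int.mod idx n) + 1)

-- ===== PRECONDITION & SPEC =====
-- Pre_ excludes n ≤ 0 (n = 0 raises ZeroDivisionError; n < 0 makes the inner range empty so A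
-- returns None, not a list) and left//n > right//n (empty outer range, A returns None).
def Pre_solution (n : Int) (left : Int) (right : Int) : Prop :=
  0 < n ∧ PySem.Int.floordiv left n ≤ PySem.Int.floordiv right n
instance (n : Int) (left : Int) (right : Int) : Decidable (Pre_solution n left right) := by
  unfold Pre_solution; infer_instance

def pvWitness_solution : Int × Int × Int := (3, 2, 7)

def Spec_solution (n : Int) (left : Int) (right : Int) (out : List Int) : Prop := out = solution_alt n left right
instance (n : Int) (left : Int) (right : Int) (out : List Int) : Decidable (Spec_solution n left right out) := by unfold Spec_solution; infer_instance

-- ===== CLAIM (what is proved, stated in full; the proofs are below) =====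
def Claim_equal_solution : Prop := ∀ (n : Int) (left : Int) (right : Int), Dom_solution n left right → Pre_solution n left right → Spec_solution n left right (solution n left right)

-- ===== LEMMAS AND PROOFS =====

-- the per-cell value B computes
def cellVal (n idx : Int) : Int := max (PySem.Int.floordiv idx n) (PySem.Int.mod idx n) + 1

theorem floordiv_row {n i r : Int} (hn : 0 < n) (h0 : 0 ≤ r) (hr : r < n) :
    PySem.Int.floordiv (i * n + r) n = i := by
  rw [PySem.Int.floordiv_eq_iff_of_pos hn]
  constructor <;> nlinarith

theorem mod_row {n i r : Int} (hn : 0 < n) (h0 : 0 ≤ r) (hr : r < n) :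
    PySem.Int.mod (i * n + r) n = r := by
  have h := PySem.Int.floordiv_mul_add_mod (i * n + r) n
  rw [floordiv_row hn h0 hr] at h
  linarith

theorem cellVal_row {n i j : Int} (hn : 0 < n) (h1 : 1 ≤ j) (hj : j ≤ n) :
    cellVal n (i * n + j - 1) = if j ≤ i then i + 1 else j := by
  have : i * n + j - 1 = i * n + (j - 1) := by ring
  rw [cellVal, this, floordiv_row hn (by omega) (by omega), mod_row hn (by omega) (by omega)]
  split_ifs with h <;> omega

theorem inner_spec (n left right i : Int) (hn : 0 < n) :
    ∀ (k : ℕ) (j0 : Int) (ans : List Int), j0 = n + 1 - k → 1 ≤ j0 →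
    i * n + j0 - 1 ≤ right →
    solInner left right i k j0 (i * n + j0 - 1) ans =
      if right ≤ i * n + n - 1 then
        Sum.inr (ans ++ (PySem.List.pyRange (max (i * n + j0 - 1) left) (right + 1) 1).map (cellVal n))
      else
        Sum.inl (i * n + n, ans ++ (PySem.List.pyRange (max (i * n + j0 - 1) left) (i * n + n) 1).map (cellVal n)) := by
  intro k
  induction k with
  | zero =>
    intro j0 ans hj0 _ hc
    have hj : j0 = n + 1 := by omega
    subst hj
    have hnotret : ¬ right ≤ i * n + n - 1 := by omega
    rw [if_neg hnotret, PySem.List.pyRange_one_eq_nil (by omega)]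
    simp [solInner]
    omega
  | succ k ih =>
    intro j0 ans hj0 h1 hc
    simp only [solInner]
    rw [show i * n + j0 - 1 + 1 = i * n + j0 from by ring]
    have hcv : (if j0 ≤ i then ans ++ [i + 1] else ans ++ [j0]) = ans ++ [cellVal n (i * n + j0 - 1)] := by
      rw [cellVal_row hn h1 (by omega)]
      split_ifs <;> rfl
    by_cases hret : i * n + j0 > right
    · -- return now: count = i*n+j0 > right, and entry count ≤ right forces right = i*n+j0-1
      have hre : right = i * n + j0 - 1 := by omega
      rw [if_pos hret, if_pos (show right ≤ i * n + n - 1 by omega)]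
      by_cases hl : i * n + j0 > left
      · rw [if_pos hl, hcv]
        congr 2
        have hm : max (i * n + j0 - 1) left = i * n + j0 - 1 := by omega
        rw [hm, hre, PySem.List.pyRange_one_cons (by omega), PySem.List.pyRange_one_eq_nil (by omega)]
        simp
      · rw [if_neg hl]
        have hm : max (i * n + j0 - 1) left = left := by omega
        rw [hm, hre, PySem.List.pyRange_one_eq_nil (by omega)]
        simp
    · -- keep looping
      rw [if_neg hret, hcv]
      have hc2 : i * n + (j0 + 1) - 1 ≤ right := by omega
      have step : ∀ ans0 : List Int,
          solInner left right i k (j0 + 1) (i * n + j0) ans0 =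
          solInner left right i k (j0 + 1) (i * n + (j0 + 1) - 1) ans0 := by
        intro ans0; congr 1; ring
      have combine : ∀ E : Int, i * n + j0 ≤ E →
          (if i * n + j0 > left then ans ++ [cellVal n (i * n + j0 - 1)] else ans) ++
            (PySem.List.pyRange (max (i * n + (j0 + 1) - 1) left) E 1).map (cellVal n) =
          ans ++ (PySem.List.pyRange (max (i * n + j0 - 1) left) E 1).map (cellVal n) := by
        intro E hE
        by_cases hl : i * n + j0 > left
        · rw [if_pos hl]
          have h1m : max (i * n + j0 - 1) left = i * n + j0 - 1 := by omega
          have h2m : max (i * n + (j0 + 1) - 1) left = i * n + j0 := by omega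
          rw [h1m, h2m, PySem.List.pyRange_one_cons (show i * n + j0 - 1 < E by omega)]
          rw [show i * n + j0 - 1 + 1 = i * n + j0 from by ring]
          simp
        · rw [if_neg hl]
          have h1m : max (i * n + j0 - 1) left = left := by omega
          have h2m : max (i * n + (j0 + 1) - 1) left = left := by omega
          rw [h1m, h2m]
      rw [step _, ih (j0 + 1) _ (by omega) (by omega) hc2]
      by_cases hretc : right ≤ i * n + n - 1
      · rw [if_pos hretc, if_pos hretc]
        exact congrArg Sum.inr (combine (right + 1) (by omega))
      · rw [if_neg hretc, if_neg hretc]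
        exact congrArg (fun l => Sum.inl (i * n + n, l)) (combine (i * n + n) (by omega))

theorem solOuter_succ (n left right : Int) (fuel : ℕ) (i count : Int) (answer : List Int) :
    solOuter n left right (fuel + 1) i count answer =
      match solInner left right i n.toNat 1 count answer with
      | Sum.inr ans => ans
      | Sum.inl (count', answer') => solOuter n left right fuel (i + 1) count' answer' := rfl

theorem outer_spec (n left right : Int) (hn : 0 < n) :
    ∀ (k : ℕ) (i0 : Int) (ans : List Int),
    i0 = PySem.Int.floordiv right n - k →
    i0 * n ≤ right → left < i0 * n + n →
    solOuter n left right (k + 1) i0 (i0 * n) ans =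
      ans ++ (PySem.List.pyRange (max (i0 * n) left) (right + 1) 1).map (cellVal n) := by
  have hrd : PySem.Int.floordiv right n * n ≤ right ∧ right < PySem.Int.floordiv right n * n + n := by
    have h := (PySem.Int.floordiv_eq_iff_of_pos hn (a := right) (q := PySem.Int.floordiv right n)).mp rfl
    constructor <;> nlinarith [h.1, h.2]
  have hfuel : ∀ j0 : Int, j0 = 1 → j0 = n + 1 - n.toNat := by intro j0 h; omega
  intro k
  induction k with
  | zero =>
    intro i0 ans hi0 hle hlt
    have hi : i0 = PySem.Int.floordiv right n := by omega
    subst hi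
    rw [solOuter_succ]
    rw [show PySem.Int.floordiv right n * n = PySem.Int.floordiv right n * n + 1 - 1 from by ring,
      inner_spec n left right _ hn n.toNat 1 ans (hfuel 1 rfl) (by omega) (by omega)]
    rw [if_pos (by omega)]
  | succ k ih =>
    intro i0 ans hi0 hle hlt
    have hi0lt : i0 < PySem.Int.floordiv right n := by omega
    rw [solOuter_succ]
    have hright : i0 * n + 1 - 1 ≤ right := by nlinarith [hrd.1, hi0lt]
    rw [show i0 * n = i0 * n + 1 - 1 from by ring,
      inner_spec n left right _ hn n.toNat 1 ans (hfuel 1 rfl) (by omega) hright]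
    have hnret : ¬ right ≤ i0 * n + n - 1 := by nlinarith [hrd.1, hi0lt]
    rw [if_neg hnret]
    dsimp only
    rw [show i0 * n + n = (i0 + 1) * n from by ring,
      ih (i0 + 1) _ (by omega) (by nlinarith [hrd.1, hi0lt]) (by nlinarith)]
    have hmax2 : max ((i0 + 1) * n) left = (i0 + 1) * n := by
      have : left < (i0 + 1) * n := by nlinarith
      omega
    rw [hmax2, List.append_assoc, ← List.map_append]
    rw [show i0 * n + 1 - 1 = i0 * n from by ring]
    rw [← PySem.List.pyRange_one_append (max (i0 * n) left) ((i0 + 1) * n) (right + 1)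
        (max_le (by nlinarith) (by nlinarith)) (by nlinarith [hrd.1, hi0lt])]

-- ===== VERDICT (by name: the statement is the Claim_ definition above) =====
theorem solution_spec : Claim_equal_solution := by
  intro n left right _ hpre
  obtain ⟨hn, hlr⟩ := hpre
  unfold Spec_solution solution solution_alt
  have hld := (PySem.Int.floordiv_eq_iff_of_pos hn (a := left) (q := PySem.Int.floordiv left n)).mp rfl
  have hrd := (PySem.Int.floordiv_eq_iff_of_pos hn (a := right) (q := PySem.Int.floordiv right n)).mp rfl
  have hk : PySem.Int.floordiv left n = PySem.Int.floordiv right n - (PySem.Int.floordiv right n - PySem.Int.floordiv left n).toNat := by omega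
  rw [show (PySem.Int.floordiv right n + 1 - PySem.Int.floordiv left n).toNat =
        (PySem.Int.floordiv right n - PySem.Int.floordiv left n).toNat + 1 from by omega]
  rw [outer_spec n left right hn (PySem.Int.floordiv right n - PySem.Int.floordiv left n).toNat
      (PySem.Int.floordiv left n) [] hk
      (by nlinarith [hld.1, hrd.1, hrd.2, hlr]) (by nlinarith [hld.2])]
  have hmax : max (PySem.Int.floordiv left n * n) left = left := by
    have := hld.1; omega
  rw [hmax]
  rfl
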